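-- pv_equiv track=rewrite | github.com/farmerbob1/aios | tools/populate_fs.py | _gen_tiled_tex
-- ===== SOURCE A (Python) =====
-- def _gen_tiled_tex(w, h, tile_w, tile_h, color1, color2, grout=None):
--     """Generate a tiled texture pattern."""
--     px = []
--     for y in range(h):
--         for x in range(w):
--             tx = x % tile_w
--             ty = y % tile_h
--             if grout and (tx == 0 or ty == 0):
--                 px.append(grout)
--             elif ((x // tile_w) + (y // tile_h)) % 2 == 0:
--                 px.append(color1)
--             else:
--                 px.append(color2)
--     return px
-- ===== SOURCE B (Python) =====
-- def _gen_tiled_tex(w, h, tile_w, tile_h, color1, color2, grout=None):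
--     """Tiled texture via precomputed row templates, assembled row by row."""
--     if h <= 0 or w <= 0:
--         return []
--     rows = []
--     for p in (0, 1):
--         rows.append([grout if grout and x % tile_w == 0
--                      else color1 if (x // tile_w + p) % 2 == 0
--                      else color2
--                      for x in range(w)])
--     grout_row = [grout for _ in range(w)]
--     px = []
--     for y in range(h):
--         if grout and y % tile_h == 0:
--             px.extend(grout_row)
--         else:
--             px.extend(rows[(y // tile_h) % 2])
--     return px
-- ===== Notes on version B (the rewrite author's own statement) =====
-- stated objective: alternative
-- what changed: B precomputes the two checker row templates and the grout row once, then assembles the output by extending with the right template per y, instead of recomputing every pixel's branch in a flat nested per-pixel loop.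
import Mathlib
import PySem

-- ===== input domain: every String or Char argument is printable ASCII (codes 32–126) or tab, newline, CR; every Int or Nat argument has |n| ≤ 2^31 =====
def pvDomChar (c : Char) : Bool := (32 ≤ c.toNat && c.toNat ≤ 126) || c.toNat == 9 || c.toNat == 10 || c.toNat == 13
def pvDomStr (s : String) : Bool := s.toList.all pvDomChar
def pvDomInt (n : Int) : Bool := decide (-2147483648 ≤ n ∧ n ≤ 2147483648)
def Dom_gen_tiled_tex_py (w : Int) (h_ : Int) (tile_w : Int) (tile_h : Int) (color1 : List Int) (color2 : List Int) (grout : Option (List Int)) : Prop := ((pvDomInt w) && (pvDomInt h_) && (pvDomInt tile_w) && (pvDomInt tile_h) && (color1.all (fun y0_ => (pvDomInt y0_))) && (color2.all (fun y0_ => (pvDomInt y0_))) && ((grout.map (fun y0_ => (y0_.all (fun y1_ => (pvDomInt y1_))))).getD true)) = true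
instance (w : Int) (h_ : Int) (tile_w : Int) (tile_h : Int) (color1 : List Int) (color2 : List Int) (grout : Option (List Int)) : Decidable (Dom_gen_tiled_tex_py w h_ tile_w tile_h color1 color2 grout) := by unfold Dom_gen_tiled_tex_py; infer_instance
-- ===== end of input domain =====

-- B rebuilds the texture from precomputed row templates (grout row + two checker parities) instead of A's flat per-pixel nested loop; same values, alternative decomposition.


-- Python truthiness of the 'grout' argument: None and the empty list are falsy.
def pvTruthy (g : Option (List Int)) : Bool :=
  match g with
  | some l => !l.isEmpty
  | none => false

-- ===== PORT A =====
def gen_tiled_tex_py (w : Int) (h_ : Int) (tile_w : Int) (tile_h : Int) (color1 : List Int) (color2 : List Int) (grout : Option (List Int)) : List (List Int) :=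
  (PySem.List.pyRange 0 h_ 1).foldl (fun px y =>
    (PySem.List.pyRange 0 w 1).foldl (fun px x =>
      let tx := PySem.Int.mod x tile_w
      let ty := PySem.Int.mod y tile_h
      if pvTruthy grout = true ∧ (tx = 0 ∨ ty = 0) then px ++ [grout.getD []]
      else if PySem.Int.mod (PySem.Int.floordiv x tile_w + PySem.Int.floordiv y tile_h) 2 = 0 then px ++ [color1]
      else px ++ [color2]) px) []

-- ===== PORT B =====
-- one checker row template for vertical parity p (Python list comprehension)
def pvAltRow (w : Int) (tile_w : Int) (color1 : List Int) (color2 : List Int) (grout : Option (List Int)) (p : Int) : List (List Int) :=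
  (PySem.List.pyRange 0 w 1).map (fun x =>
    if pvTruthy grout = true ∧ PySem.Int.mod x tile_w = 0 then grout.getD []
    else if PySem.Int.mod (PySem.Int.floordiv x tile_w + p) 2 = 0 then color1
    else color2)

def gen_tiled_tex_py_alt (w : Int) (h_ : Int) (tile_w : Int) (tile_h : Int) (color1 : List Int) (color2 : List Int) (grout : Option (List Int)) : List (List Int) :=
  if h_ ≤ 0 ∨ w ≤ 0 then []
  else
    let row0 := pvAltRow w tile_w color1 color2 grout 0
    let row1 := pvAltRow w tile_w color1 color2 grout 1
    let groutRow := (PySem.List.pyRange 0 w 1).map (fun _ => grout.getD [])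
    (PySem.List.pyRange 0 h_ 1).foldl (fun px y =>
      if pvTruthy grout = true ∧ PySem.Int.mod y tile_h = 0 then px ++ groutRow
      else px ++ (if PySem.Int.mod (PySem.Int.floordiv y tile_h) 2 = 0 then row0 else row1)) []

-- ===== PRECONDITION & SPEC =====
-- A raises ZeroDivisionError exactly when both loops execute (w > 0 and h > 0) and a tile dimension is 0; Pre_ excludes only those inputs.
def Pre_gen_tiled_tex_py (w : Int) (h_ : Int) (tile_w : Int) (tile_h : Int) (color1 : List Int) (color2 : List Int) (grout : Option (List Int)) : Prop :=
  0 < h_ → 0 < w → (tile_w ≠ 0 ∧ tile_h ≠ 0)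
instance (w : Int) (h_ : Int) (tile_w : Int) (tile_h : Int) (color1 : List Int) (color2 : List Int) (grout : Option (List Int)) : Decidable (Pre_gen_tiled_tex_py w h_ tile_w tile_h color1 color2 grout) := by unfold Pre_gen_tiled_tex_py; infer_instance

def pvWitness_gen_tiled_tex_py : Int × Int × Int × Int × List Int × List Int × Option (List Int) := (4, 3, 2, 2, [1], [2], some [9])

def Spec_gen_tiled_tex_py (w : Int) (h_ : Int) (tile_w : Int) (tile_h : Int) (color1 : List Int) (color2 : List Int) (grout : Option (List Int)) (out : List (List Int)) : Prop := out = gen_tiled_tex_py_alt w h_ tile_w tile_h color1 color2 grout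
instance (w : Int) (h_ : Int) (tile_w : Int) (tile_h : Int) (color1 : List Int) (color2 : List Int) (grout : Option (List Int)) (out : List (List Int)) : Decidable (Spec_gen_tiled_tex_py w h_ tile_w tile_h color1 color2 grout out) := by unfold Spec_gen_tiled_tex_py; infer_instance

-- ===== CLAIM (what is proved, stated in full; the proofs are below) =====
def Claim_equal_gen_tiled_tex_py : Prop := ∀ (w : Int) (h_ : Int) (tile_w : Int) (tile_h : Int) (color1 : List Int) (color2 : List Int) (grout : Option (List Int)), Dom_gen_tiled_tex_py w h_ tile_w tile_h color1 color2 grout → Pre_gen_tiled_tex_py w h_ tile_w tile_h color1 color2 grout → Spec_gen_tiled_tex_py w h_ tile_w tile_h color1 color2 grout (gen_tiled_tex_py w h_ tile_w tile_h color1 color2 grout)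

-- ===== LEMMAS AND PROOFS =====

-- A's per-pixel value
def pvPix (tile_w : Int) (tile_h : Int) (color1 : List Int) (color2 : List Int) (grout : Option (List Int)) (y : Int) (x : Int) : List Int :=
  if pvTruthy grout = true ∧ (PySem.Int.mod x tile_w = 0 ∨ PySem.Int.mod y tile_h = 0) then grout.getD []
  else if PySem.Int.mod (PySem.Int.floordiv x tile_w + PySem.Int.floordiv y tile_h) 2 = 0 then color1
  else color2

-- the row that A produces for a given y, expressed with B's templates
def pvRowFor (w : Int) (tile_w : Int) (tile_h : Int) (color1 : List Int) (color2 : List Int) (grout : Option (List Int)) (y : Int) : List (List Int) :=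
  if pvTruthy grout = true ∧ PySem.Int.mod y tile_h = 0 then (PySem.List.pyRange 0 w 1).map (fun _ => grout.getD [])
  else if PySem.Int.mod (PySem.Int.floordiv y tile_h) 2 = 0 then pvAltRow w tile_w color1 color2 grout 0
  else pvAltRow w tile_w color1 color2 grout 1

theorem pv_mod_two (z : Int) : PySem.Int.mod z 2 = z % 2 := PySem.Int.mod_eq_emod_of_pos (by norm_num)

theorem pvPix_eq_elem (tile_w tile_h : Int) (c1 c2 : List Int) (g : Option (List Int)) (y x p : Int)
    (h : ¬(pvTruthy g = true ∧ PySem.Int.mod y tile_h = 0))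
    (hp : PySem.Int.mod (PySem.Int.floordiv y tile_h) 2 = PySem.Int.mod p 2) :
    pvPix tile_w tile_h c1 c2 g y x =
      (if pvTruthy g = true ∧ PySem.Int.mod x tile_w = 0 then g.getD []
       else if PySem.Int.mod (PySem.Int.floordiv x tile_w + p) 2 = 0 then c1 else c2) := by
  unfold pvPix
  by_cases hgt : pvTruthy g = true
  · have hy : ¬ PySem.Int.mod y tile_h = 0 := fun hy => h ⟨hgt, hy⟩
    by_cases htx : PySem.Int.mod x tile_w = 0
    · rw [if_pos ⟨hgt, Or.inl htx⟩, if_pos ⟨hgt, htx⟩]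
    · have hc1 : ¬(pvTruthy g = true ∧ (PySem.Int.mod x tile_w = 0 ∨ PySem.Int.mod y tile_h = 0)) :=
        fun hc => hc.2.elim htx hy
      have hc2 : ¬(pvTruthy g = true ∧ PySem.Int.mod x tile_w = 0) := fun hc => htx hc.2
      rw [if_neg hc1, if_neg hc2]
      refine if_congr ?_ rfl rfl
      simp only [pv_mod_two] at hp ⊢
      omega
  · have hc1 : ¬(pvTruthy g = true ∧ (PySem.Int.mod x tile_w = 0 ∨ PySem.Int.mod y tile_h = 0)) :=
      fun hc => hgt hc.1
    have hc2 : ¬(pvTruthy g = true ∧ PySem.Int.mod x tile_w = 0) := fun hc => hgt hc.1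
    rw [if_neg hc1, if_neg hc2]
    refine if_congr ?_ rfl rfl
    simp only [pv_mod_two] at hp ⊢
    omega

theorem pv_map_pix_eq_rowFor (w tile_w tile_h : Int) (c1 c2 : List Int) (g : Option (List Int)) (y : Int) :
    (PySem.List.pyRange 0 w 1).map (pvPix tile_w tile_h c1 c2 g y) = pvRowFor w tile_w tile_h c1 c2 g y := by
  unfold pvRowFor
  by_cases hg : pvTruthy g = true ∧ PySem.Int.mod y tile_h = 0
  · rw [if_pos hg]
    exact List.map_congr_left (fun x _ => by unfold pvPix; rw [if_pos ⟨hg.1, Or.inr hg.2⟩])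
  · rw [if_neg hg]
    by_cases hp : PySem.Int.mod (PySem.Int.floordiv y tile_h) 2 = 0
    · rw [if_pos hp]
      unfold pvAltRow
      refine List.map_congr_left (fun x _ => ?_)
      exact pvPix_eq_elem tile_w tile_h c1 c2 g y x 0 hg (by simp only [pv_mod_two] at hp ⊢; omega)
    · rw [if_neg hp]
      unfold pvAltRow
      refine List.map_congr_left (fun x _ => ?_)
      refine pvPix_eq_elem tile_w tile_h c1 c2 g y x 1 hg ?_
      simp only [pv_mod_two] at hp ⊢
      omega

theorem pvA_eq_rows (w h_ tile_w tile_h : Int) (c1 c2 : List Int) (g : Option (List Int)) :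
    gen_tiled_tex_py w h_ tile_w tile_h c1 c2 g =
      (PySem.List.pyRange 0 h_ 1).foldl (fun px y => px ++ pvRowFor w tile_w tile_h c1 c2 g y) [] := by
  unfold gen_tiled_tex_py
  refine PySem.List.foldl_congr_mem _ _ _ _ (fun px y _ => ?_)
  calc (PySem.List.pyRange 0 w 1).foldl (fun px x =>
          let tx := PySem.Int.mod x tile_w
          let ty := PySem.Int.mod y tile_h
          if pvTruthy g = true ∧ (tx = 0 ∨ ty = 0) then px ++ [g.getD []]
          else if PySem.Int.mod (PySem.Int.floordiv x tile_w + PySem.Int.floordiv y tile_h) 2 = 0 then px ++ [c1]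
          else px ++ [c2]) px
      = (PySem.List.pyRange 0 w 1).foldl (fun px x => px ++ [pvPix tile_w tile_h c1 c2 g y x]) px := by
        refine PySem.List.foldl_congr_mem _ _ _ _ (fun acc x _ => ?_)
        dsimp only
        unfold pvPix
        split_ifs <;> rfl
    _ = px ++ (PySem.List.pyRange 0 w 1).map (pvPix tile_w tile_h c1 c2 g y) :=
        PySem.List.foldl_append_singleton_eq_map _ _ _
    _ = px ++ pvRowFor w tile_w tile_h c1 c2 g y := by rw [pv_map_pix_eq_rowFor]

theorem pv_foldl_fixed {α β : Type} (l : List β) (init : α) : l.foldl (fun a _ => a) init = init := by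
  induction l generalizing init with
  | nil => rfl
  | cons b t ih => exact ih init

theorem gen_tiled_tex_py_eq_alt (w h_ tile_w tile_h : Int) (c1 c2 : List Int) (g : Option (List Int)) :
    gen_tiled_tex_py w h_ tile_w tile_h c1 c2 g = gen_tiled_tex_py_alt w h_ tile_w tile_h c1 c2 g := by
  rw [pvA_eq_rows]
  unfold gen_tiled_tex_py_alt
  by_cases hguard : h_ ≤ 0 ∨ w ≤ 0
  · rw [if_pos hguard]
    rcases hguard with hh | hw
    · rw [PySem.List.pyRange_one_eq_nil (by omega : h_ ≤ (0:Int))]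
      rfl
    · have hwz : PySem.List.pyRange 0 w 1 = [] := PySem.List.pyRange_one_eq_nil (by omega)
      have hrow : ∀ y, pvRowFor w tile_w tile_h c1 c2 g y = [] := by
        intro y
        unfold pvRowFor pvAltRow
        rw [hwz]
        split_ifs <;> rfl
      calc (PySem.List.pyRange 0 h_ 1).foldl (fun px y => px ++ pvRowFor w tile_w tile_h c1 c2 g y) []
          = (PySem.List.pyRange 0 h_ 1).foldl (fun px _ => px) [] := by
            refine PySem.List.foldl_congr_mem _ _ _ _ (fun px y _ => ?_)
            rw [hrow y, List.append_nil]
        _ = [] := pv_foldl_fixed _ _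
  · rw [if_neg hguard]
    dsimp only
    refine PySem.List.foldl_congr_mem _ _ _ _ (fun px y _ => ?_)
    unfold pvRowFor
    split_ifs <;> rfl

-- ===== VERDICT (by name: the statement is the Claim_ definition above) =====
theorem gen_tiled_tex_py_spec : Claim_equal_gen_tiled_tex_py := by
  intro w h_ tile_w tile_h color1 color2 grout _ _
  unfold Spec_gen_tiled_tex_py
  exact gen_tiled_tex_py_eq_alt w h_ tile_w tile_h color1 color2 grout
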